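-- pv_equiv track=rewrite | github.com/nlzrk/latex-vim | gui.py | _split_top
-- ===== SOURCE A (Python) =====
-- def _split_top(s: str) -> list[str]:
--     """Split on commas at paren-depth 0."""
--     parts, depth, cur = [], 0, []
--     for ch in s:
--         if ch == "(":
--             depth += 1; cur.append(ch)
--         elif ch == ")":
--             depth -= 1; cur.append(ch)
--         elif ch == "," and depth == 0:
--             parts.append("".join(cur)); cur = []
--         else:
--             cur.append(ch)
--     if cur:
--         parts.append("".join(cur))
--     return parts
-- ===== SOURCE B (Python) =====
-- def _split_top(s: str) -> list[str]:
--     """Split on commas at paren-depth 0 (index/slice decomposition)."""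
--     cuts, depth = [], 0
--     i = 0
--     for ch in s:
--         if ch == "(":
--             depth += 1
--         elif ch == ")":
--             depth -= 1
--         elif ch == "," and depth == 0:
--             cuts.append(i)
--         i += 1
--     parts, prev = [], 0
--     for c in cuts:
--         parts.append(s[prev:c])
--         prev = c + 1
--     last = s[prev:]
--     if last:
--         parts.append(last)
--     return parts
-- ===== Notes on version B (the rewrite author's own statement) =====
-- stated objective: alternative
-- what changed: Replaces A's character-buffer accumulation (appending each char to cur and joining) by a two-pass index/slice decomposition: one pass records the indices of depth-0 commas, a second pass builds the parts by slicing the string between consecutive cut points.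
import Mathlib
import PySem

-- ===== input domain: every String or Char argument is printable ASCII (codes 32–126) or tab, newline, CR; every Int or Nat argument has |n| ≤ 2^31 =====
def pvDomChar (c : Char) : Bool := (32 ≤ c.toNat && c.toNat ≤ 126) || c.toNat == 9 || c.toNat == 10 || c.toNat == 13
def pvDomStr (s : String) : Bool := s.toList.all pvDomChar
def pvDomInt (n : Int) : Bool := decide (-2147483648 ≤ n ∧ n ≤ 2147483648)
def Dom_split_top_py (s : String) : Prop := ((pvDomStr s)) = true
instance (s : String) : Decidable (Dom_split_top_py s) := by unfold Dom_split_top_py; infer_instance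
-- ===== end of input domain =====

-- B replaces A's character-buffer accumulation by a two-pass index/slice decomposition
-- (record depth-0 comma indices, then slice the string between them); same cost, different structure.

-- ===== PORT A =====
-- state: (parts, depth, cur) exactly as in the Python
def split_top_py (s : String) : List String :=
  let st := s.toList.foldl
    (fun (acc : List String × Int × List Char) ch =>
      let (parts, depth, cur) := acc
      if ch = '(' then (parts, depth + 1, cur ++ [ch])
      else if ch = ')' then (parts, depth - 1, cur ++ [ch])
      else if ch = ',' ∧ depth = 0 then (parts ++ [String.ofList cur], depth, [])
      else (parts, depth, cur ++ [ch]))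
    ([], 0, [])
  if st.2.2 ≠ [] then st.1 ++ [String.ofList st.2.2] else st.1

-- ===== PORT B =====
-- first pass: (cuts, depth, i) — record indices of depth-0 commas;
-- second pass: (parts, prev) — slice between cut points; trailing slice kept iff nonempty.
def split_top_py_alt (s : String) : List String :=
  let cs := s.toList
  let r1 := cs.foldl
    (fun (acc : List Int × Int × Int) ch =>
      let (cuts, depth, i) := acc
      if ch = '(' then (cuts, depth + 1, i + 1)
      else if ch = ')' then (cuts, depth - 1, i + 1)
      else if ch = ',' ∧ depth = 0 then (cuts ++ [i], depth, i + 1)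
      else (cuts, depth, i + 1))
    ([], 0, 0)
  let r2 := r1.1.foldl
    (fun (acc : List String × Int) c =>
      (acc.1 ++ [String.ofList (PySem.List.slice cs (some acc.2) (some c))], c + 1))
    ([], 0)
  let last := PySem.List.slice cs (some r2.2) none
  if last ≠ [] then r2.1 ++ [String.ofList last] else r2.1

-- ===== PRECONDITION & SPEC =====
def Spec_split_top_py (s : String) (out : List String) : Prop := out = split_top_py_alt s
instance (s : String) (out : List String) : Decidable (Spec_split_top_py s out) := by unfold Spec_split_top_py; infer_instance

-- ===== CLAIM (what is proved, stated in full; the proofs are below) =====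
def Claim_equal_split_top_py : Prop := ∀ (s : String), Dom_split_top_py s → Spec_split_top_py s (split_top_py s)

-- ===== LEMMAS AND PROOFS =====

-- common reference recursion: split the remaining chars t at depth d with buffer cur
def pvRef : List Char → Int → List Char → List String
  | [], _, cur => if cur ≠ [] then [String.ofList cur] else []
  | ch :: t, d, cur =>
    if ch = '(' then pvRef t (d + 1) (cur ++ [ch])
    else if ch = ')' then pvRef t (d - 1) (cur ++ [ch])
    else if ch = ',' ∧ d = 0 then String.ofList cur :: pvRef t d []
    else pvRef t d (cur ++ [ch])

-- A's fold, run from an arbitrary state, appends pvRef of the rest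
theorem pvA_fold (t : List Char) : ∀ (parts : List String) (d : Int) (cur : List Char),
    (let st := t.foldl
        (fun (acc : List String × Int × List Char) ch =>
          let (parts, depth, cur) := acc
          if ch = '(' then (parts, depth + 1, cur ++ [ch])
          else if ch = ')' then (parts, depth - 1, cur ++ [ch])
          else if ch = ',' ∧ depth = 0 then (parts ++ [String.ofList cur], depth, [])
          else (parts, depth, cur ++ [ch]))
        (parts, d, cur)
      if st.2.2 ≠ [] then st.1 ++ [String.ofList st.2.2] else st.1)
    = parts ++ pvRef t d cur := by
  induction t with
  | nil =>
    intro parts d cur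
    by_cases h : cur = [] <;> simp [pvRef, h]
  | cons ch t ih =>
    intro parts d cur
    simp only [List.foldl_cons]
    by_cases h1 : ch = '(' <;> by_cases h2 : ch = ')' <;> by_cases h3 : ch = ',' ∧ d = 0 <;>
      simp [pvRef, h1, h2, h3, ih, List.append_assoc]

-- B's first fold computes cuts recursively
def pvCuts : List Char → Int → Int → List Int
  | [], _, _ => []
  | ch :: t, d, i =>
    if ch = '(' then pvCuts t (d + 1) (i + 1)
    else if ch = ')' then pvCuts t (d - 1) (i + 1)
    else if ch = ',' ∧ d = 0 then i :: pvCuts t d (i + 1)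
    else pvCuts t d (i + 1)

theorem pvB_fold1 (t : List Char) : ∀ (cuts : List Int) (d i : Int),
    (t.foldl
      (fun (acc : List Int × Int × Int) ch =>
        let (cuts, depth, i) := acc
        if ch = '(' then (cuts, depth + 1, i + 1)
        else if ch = ')' then (cuts, depth - 1, i + 1)
        else if ch = ',' ∧ depth = 0 then (cuts ++ [i], depth, i + 1)
        else (cuts, depth, i + 1))
      (cuts, d, i)).1
    = cuts ++ pvCuts t d i := by
  induction t with
  | nil => intro cuts d i; simp [pvCuts]
  | cons ch t ih =>
    intro cuts d i
    simp only [List.foldl_cons]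
    by_cases h1 : ch = '(' <;> by_cases h2 : ch = ')' <;> by_cases h3 : ch = ',' ∧ d = 0 <;>
      simp [pvCuts, h1, h2, h3, ih, List.append_assoc]

-- B's second fold, recursively
def pvSegs (cs : List Char) : List Int → Int → List String × Int
  | [], prev => ([], prev)
  | c :: t, prev =>
    let r := pvSegs cs t (c + 1)
    (String.ofList (PySem.List.slice cs (some prev) (some c)) :: r.1, r.2)

theorem pvB_fold2 (cs : List Char) (l : List Int) : ∀ (parts : List String) (prev : Int),
    l.foldl
      (fun (acc : List String × Int) c =>
        (acc.1 ++ [String.ofList (PySem.List.slice cs (some acc.2) (some c))], c + 1))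
      (parts, prev)
    = (parts ++ (pvSegs cs l prev).1, (pvSegs cs l prev).2) := by
  induction l with
  | nil => intro parts prev; simp [pvSegs]
  | cons c t ih => intro parts prev; simp [pvSegs, ih, List.append_assoc]

-- one-step slice extension: s[prev:i] + s[i] = s[prev:i+1]
theorem pvSliceSucc (cs : List Char) (prev i : Nat) (ch : Char) (hpi : prev ≤ i)
    (h : cs[i]? = some ch) :
    PySem.List.slice cs (some (prev : Int)) (some (i : Int)) ++ [ch]
      = PySem.List.slice cs (some (prev : Int)) (some ((i : Int) + 1)) := by
  have hc : ((i : Int) + 1) = (((i + 1 : Nat)) : Int) := by push_cast; ring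
  rw [hc, PySem.List.slice_natCast, PySem.List.slice_natCast]
  have h2 : i + 1 - prev = (i - prev) + 1 := by omega
  rw [h2, List.take_succ]
  have h3 : (cs.drop prev)[i - prev]? = some ch := by
    rw [List.getElem?_drop, Nat.add_sub_cancel' hpi]; exact h
  simp [h3]

-- the bridge: pvRef on the suffix starting at i equals B's slice construction
theorem pvBridge (cs : List Char) : ∀ (t : List Char) (d : Int) (prev i : Nat),
    prev ≤ i → i + t.length = cs.length → t = cs.drop i →
    pvRef t d (PySem.List.slice cs (some (prev : Int)) (some (i : Int)))
      = (pvSegs cs (pvCuts t d (i : Int)) (prev : Int)).1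
        ++ (let last := PySem.List.slice cs (some (pvSegs cs (pvCuts t d (i : Int)) (prev : Int)).2) none
            if last ≠ [] then [String.ofList last] else []) := by
  intro t
  induction t with
  | nil =>
    intro d prev i hpi hlen hdrop
    have hi : i = cs.length := by simpa using hlen
    subst hi
    have hdp : (cs.drop prev).length = cs.length - prev := by simp
    simp only [pvRef, pvCuts, pvSegs, PySem.List.slice_natCast, PySem.List.slice_from_natCast,
      List.nil_append]
    rw [List.take_of_length_le (by omega)]
  | cons ch t ih =>
    intro d prev i hpi hlen hdrop
    have hlt : i < cs.length := by
      have := hlen; simp [List.length_cons] at this; omega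
    have hget : cs[i]? = some ch := by
      have h0 : (cs.drop i)[0]? = some ch := by rw [← hdrop]; rfl
      rw [List.getElem?_drop] at h0; simpa using h0
    have hdrop' : t = cs.drop (i + 1) := by
      have := congrArg List.tail hdrop
      simpa [List.tail_drop] using this
    have hlen' : (i + 1) + t.length = cs.length := by
      simp [List.length_cons] at hlen; omega
    have hcast : ((i : Int) + 1) = (((i + 1 : Nat)) : Int) := by push_cast; ring
    by_cases h1 : ch = '('
    · simp only [pvRef, pvCuts, h1, if_pos]
      rw [pvSliceSucc cs prev i '(' hpi (h1 ▸ hget), hcast]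
      exact ih (d + 1) prev (i + 1) (by omega) hlen' hdrop'
    · by_cases h2 : ch = ')'
      · simp only [pvRef, pvCuts, h2, if_pos]
        rw [pvSliceSucc cs prev i ')' hpi (h2 ▸ hget), hcast]
        exact ih (d - 1) prev (i + 1) (by omega) hlen' hdrop'
      · by_cases h3 : ch = ',' ∧ d = 0
        · simp only [pvRef, pvCuts, if_neg h1, if_neg h2, if_pos h3, pvSegs, List.cons_append]
          rw [hcast]
          have hz : PySem.List.slice cs (some (((i + 1 : Nat)) : Int)) (some (((i + 1 : Nat)) : Int)) = [] := by
            rw [PySem.List.slice_natCast]; simp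
          have hih := ih d (i + 1) (i + 1) (le_refl _) hlen' hdrop'
          rw [hz] at hih
          rw [hih]
        · simp only [pvRef, pvCuts, if_neg h1, if_neg h2, if_neg h3]
          rw [pvSliceSucc cs prev i ch hpi hget, hcast]
          exact ih d prev (i + 1) (by omega) hlen' hdrop'

-- ===== VERDICT (by name: the statement is the Claim_ definition above) =====
theorem split_top_py_spec : Claim_equal_split_top_py := by
  unfold Claim_equal_split_top_py
  intro s _
  unfold Spec_split_top_py split_top_py split_top_py_alt
  rw [pvA_fold]
  simp only [pvB_fold1, pvB_fold2]
  have h0 : PySem.List.slice s.toList (some ((0 : Nat) : Int)) (some ((0 : Nat) : Int)) = [] := by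
    rw [PySem.List.slice_natCast]; simp
  have := pvBridge s.toList s.toList 0 0 0 (le_refl _) (by simp) (by simp)
  rw [h0] at this
  simp only [List.nil_append]
  rw [this]
  split_ifs <;> simp_all
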